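-- pv_equiv track=rewrite | github.com/poorkenny/airbnb-python | coding/collatz.py | find_longest_steps
-- ===== SOURCE A (Python) =====
-- step_map = {}
--
-- def find_steps(num):
--     if num <= 1:
--         return 1
--     if num in step_map:
--         return step_map[num]
--     if num % 2 == 0:
--         return 1 + find_steps(num // 2)
--     return 1 + find_steps(3 * num + 1)
--
-- def find_longest_steps(num):
--     if num < 1:
--         return 0
--     res = 0
--     for i in range(1, num + 1):
--         t = find_steps(i)
--         step_map[i] = t
--         res = max(res, t)
--     return res
-- ===== SOURCE B (Python) =====
-- def find_longest_steps(num):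
--     if num < 1:
--         return 0
--     cache = [0, 1]  # cache[k] = step count of k, filled bottom-up; index 0 unused
--     best = 1
--     for i in range(2, num + 1):
--         x = i
--         k = 0
--         while x >= i:
--             x = x // 2 if x % 2 == 0 else 3 * x + 1
--             k += 1
--         s = cache[x] + k
--         cache.append(s)
--         if s > best:
--             best = s
--     return best
-- ===== Notes on version B (the rewrite author's own statement) =====
-- stated objective: faster
-- what changed: A recursively follows each trajectory, consulting/filling a module-level dict memo; B is a bottom-up DP over a dense array: for each i it runs a tight iterative loop until the trajectory drops below i, then reads the already-computed count off the array - no recursion, no dict.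
import Mathlib
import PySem

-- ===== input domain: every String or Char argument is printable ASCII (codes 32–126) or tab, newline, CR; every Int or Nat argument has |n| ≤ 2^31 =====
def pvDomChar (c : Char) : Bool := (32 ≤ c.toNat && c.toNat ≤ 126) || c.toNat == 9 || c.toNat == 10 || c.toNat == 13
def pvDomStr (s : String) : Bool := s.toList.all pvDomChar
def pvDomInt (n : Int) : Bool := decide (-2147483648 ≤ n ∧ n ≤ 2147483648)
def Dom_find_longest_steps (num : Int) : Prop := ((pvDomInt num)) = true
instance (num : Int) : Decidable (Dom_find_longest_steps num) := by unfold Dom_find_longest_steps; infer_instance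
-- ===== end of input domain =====

-- B replaces A's per-trajectory recursive descent with its module-level dict memo by a
-- bottom-up DP over a dense array: an iterative loop follows the trajectory only until it
-- drops below the current start, then reads the stored count off the array (constant-factor
-- speedup in Python; no recursion, no dict).
-- A mutates the module-level dict step_map; the equivalence proved here is about the return
-- value (the stored values are canonical, so callers see the same results).
-- Python's dict is ported as Std.HashMap (only get?/insert on Int keys are used, on which it
-- is dict-exact) and Python's list as Array (append = push, a[x] = pvAGet, Python-exact),
-- so that both ports evaluate with the constant-time dict/list operations the Pythons use.

-- ===== PORT A =====
-- `fuel` only makes the (conjecturally always terminating, unbounded) Collatz recursion a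
-- total Lean function: `none` = fuel exhausted. Both ports consume one unit of the same
-- fuel per trajectory step, so no termination assumption is needed anywhere.
def pvFuel : Nat := 100501

def find_steps (fuel : Nat) (m : Std.HashMap Int Int) (x : Int) : Option Int :=
  match fuel with
  | 0 => none
  | f+1 =>
    if x ≤ 1 then some 1
    else
      match m[x]? with
      | some v => some v
      | none =>
        if PySem.Int.mod x 2 = 0 then
          (find_steps f m (PySem.Int.floordiv x 2)).map (fun t => 1 + t)
        else
          (find_steps f m (3 * x + 1)).map (fun t => 1 + t)

def stepA (st : Option (Std.HashMap Int Int × Int)) (i : Int) : Option (Std.HashMap Int Int × Int) :=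
  match st with
  | none => none
  | some (m, res) =>
    match find_steps pvFuel m i with
    | none => none
    | some t => some (m.insert i t, max res t)

def find_longest_steps (num : Int) : Int :=
  if num < 1 then 0
  else
    match (PySem.List.pyRange 1 (num + 1) 1).foldl stepA (some (∅, 0)) with
    | none => 0
    | some (_, res) => res

-- ===== PORT B =====
-- Python list indexing a[i] on an Array (negative i from the end; none = IndexError) — exact
def pvAGet (a : Array Int) (i : Int) : Option Int :=
  if 0 ≤ i then a[i.toNat]?
  else if 0 ≤ i + (a.size : Int) then a[(i + (a.size : Int)).toNat]? else none

-- the while loop of Source B: follow the trajectory until it drops below i, counting steps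
def pvGlide (fuel : Nat) (i : Int) (x : Int) (k : Int) : Option (Int × Int) :=
  match fuel with
  | 0 => none
  | f+1 =>
    if i ≤ x then
      pvGlide f i (if PySem.Int.mod x 2 = 0 then PySem.Int.floordiv x 2 else 3 * x + 1) (k + 1)
    else some (x, k)

def stepB (st : Option (Array Int × Int)) (i : Int) : Option (Array Int × Int) :=
  match st with
  | none => none
  | some (cache, best) =>
    match pvGlide pvFuel i i 0 with
    | none => none
    | some (x, k) =>
      -- s = cache[x] + k; the IndexError branch (none) is unreachable (the loop exits at
      -- some 1 ≤ x < i = len(cache)), and is proved to coincide with A's fuel exhaustion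
      match pvAGet cache x with
      | none => none
      | some cx =>
        let s := cx + k
        some (cache.push s, if best < s then s else best)

def find_longest_steps_alt (num : Int) : Int :=
  if num < 1 then 0
  else
    match (PySem.List.pyRange 2 (num + 1) 1).foldl stepB (some (#[0, 1], 1)) with
    | none => 0
    | some (_, best) => best

-- ===== PRECONDITION & SPEC =====
def Spec_find_longest_steps (num : Int) (out : Int) : Prop := out = find_longest_steps_alt num
instance (num : Int) (out : Int) : Decidable (Spec_find_longest_steps num out) := by
  unfold Spec_find_longest_steps; infer_instance

-- ===== CLAIM (what is proved, stated in full; the proofs are below) =====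
def Claim_equal_find_longest_steps : Prop :=
  ∀ (num : Int), Dom_find_longest_steps num →
    Spec_find_longest_steps num (find_longest_steps num)

-- ===== LEMMAS AND PROOFS =====

-- the bare Collatz step (proof-side abbreviation for the if-then-else both ports contain)
def pvNext (x : Int) : Int :=
  if PySem.Int.mod x 2 = 0 then PySem.Int.floordiv x 2 else 3 * x + 1

theorem pvNext_pos {x : Int} (hx : 2 ≤ x) : 1 ≤ pvNext x := by
  unfold pvNext
  by_cases h : PySem.Int.mod x 2 = 0
  · rw [if_pos h, PySem.Int.floordiv_eq_ediv_of_pos (by norm_num)]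
    omega
  · rw [if_neg h]; omega

-- the invariant tying A's memo dict to B's dense cache array
def pvRel (m : Std.HashMap Int Int) (cache : Array Int) : Prop :=
  2 ≤ cache.size ∧
  (∀ k : Int, (cache.size : Int) ≤ k → m[k]? = none) ∧
  (∀ k : Int, k < 1 → m[k]? = none) ∧
  (∀ k : Int, 1 ≤ k → k < (cache.size : Int) → m[k]? = pvAGet cache k) ∧
  pvAGet cache 1 = some 1

theorem fs_step (F : Nat) (m : Std.HashMap Int Int) (x : Int) (hx : ¬ x ≤ 1)
    (hm : m[x]? = none) :
    find_steps (F + 1) m x = (find_steps F m (pvNext x)).map (fun t => 1 + t) := by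
  simp [find_steps, pvNext, hx, hm]
  split <;> rfl

theorem glide_step (F : Nat) (i x k : Int) (hx : i ≤ x) :
    pvGlide (F + 1) i x k = pvGlide F i (pvNext x) (k + 1) := by
  simp [pvGlide, hx, pvNext]

theorem pvAGet_of_lt {cache : Array Int} {x : Int} (h0 : 0 ≤ x) (hlt : x < (cache.size : Int)) :
    ∃ c, pvAGet cache x = some c := by
  refine ⟨cache[x.toNat]'(by omega), ?_⟩
  rw [pvAGet, if_pos h0, Array.getElem?_eq_getElem (by omega)]

-- the core simulation: A's fueled recursion against B's fueled glide loop + array lookup,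
-- with IDENTICAL fuel, so even the fuel-exhaustion cases coincide
theorem pvAB {m : Std.HashMap Int Int} {cache : Array Int} (hrel : pvRel m cache) :
    ∀ (F : Nat) (x k : Int), 1 ≤ x → (cache.size : Int) ≤ x →
      (pvGlide F (cache.size : Int) x k = none ∧ find_steps F m x = none) ∨
      (∃ xf d : Int, pvGlide F (cache.size : Int) x k = some (xf, k + d) ∧
        1 ≤ xf ∧ xf < (cache.size : Int) ∧
        find_steps F m x = (pvAGet cache xf).map (fun c => c + d)) := by
  obtain ⟨hlen2, hhi, hlo, hmid, hone⟩ := hrel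
  intro F
  induction F with
  | zero => intro x k _ _; left; exact ⟨rfl, rfl⟩
  | succ F ih =>
    intro x k hx1 hxi
    have hi2 : (2 : Int) ≤ (cache.size : Int) := by exact_mod_cast hlen2
    have hx2 : ¬ x ≤ 1 := by omega
    have hmx : m[x]? = none := hhi x hxi
    have hy1 : 1 ≤ pvNext x := pvNext_pos (by omega)
    rw [glide_step F _ x k hxi]
    rw [fs_step F m x hx2 hmx]
    by_cases hyi : (cache.size : Int) ≤ pvNext x
    · rcases ih (pvNext x) (k + 1) hy1 hyi with ⟨hg, hf⟩ | ⟨xf, d, hg, h1, h2, hf⟩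
      · left; rw [hg, hf]; exact ⟨rfl, rfl⟩
      · right
        refine ⟨xf, d + 1, ?_, h1, h2, ?_⟩
        · rw [hg]; ring_nf
        · rw [hf, Option.map_map]
          cases pvAGet cache xf with
          | none => rfl
          | some c => simp; ring
    · -- trajectory dropped below the cache length: the loop exits (if any fuel remains)
      match F with
      | 0 => left; exact ⟨rfl, rfl⟩
      | F' + 1 =>
        right
        refine ⟨pvNext x, 1, ?_, hy1, by omega, ?_⟩
        · rw [pvGlide, if_neg hyi]
        · by_cases hy2 : pvNext x ≤ 1
          · have hy : pvNext x = 1 := by omega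
            rw [hy, hone]
            simp [find_steps]
          · have hmy : m[pvNext x]? = pvAGet cache (pvNext x) :=
              hmid (pvNext x) hy1 (by omega)
            obtain ⟨c, hc⟩ := pvAGet_of_lt (cache := cache) (x := pvNext x) (by omega) (by omega)
            rw [hc]
            rw [hc] at hmy
            simp [find_steps, hy2, hmy]
            ring

-- relation on the two loop states (A's (dict, res) option, B's (cache, best) option),
-- indexed by the loop counter i = current cache length
def pvRelS (sA : Option (Std.HashMap Int Int × Int)) (sB : Option (Array Int × Int))
    (i : Int) : Prop :=
  match sA, sB with
  | none, none => True
  | some (m, res), some (cache, best) => res = best ∧ (cache.size : Int) = i ∧ pvRel m cache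
  | _, _ => False

theorem ifmax (b s : Int) : (if b < s then s else b) = max b s := by
  split <;> omega

theorem pvRel_push {m : Std.HashMap Int Int} {cache : Array Int} {s : Int}
    (hrel : pvRel m cache) :
    pvRel (m.insert (cache.size : Int) s) (cache.push s) := by
  obtain ⟨hlen2, hhi, hlo, hmid, hone⟩ := hrel
  have hi2 : (2 : Int) ≤ (cache.size : Int) := by exact_mod_cast hlen2
  have hlen : ((cache.push s).size : Int) = (cache.size : Int) + 1 := by
    simp
  refine ⟨by simp; omega, ?_, ?_, ?_, ?_⟩
  · intro k hk
    rw [hlen] at hk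
    rw [Std.HashMap.getElem?_insert, if_neg (by simp; omega)]
    exact hhi k (by omega)
  · intro k hk
    rw [Std.HashMap.getElem?_insert, if_neg (by simp; omega)]
    exact hlo k hk
  · intro k hk1 hk2
    rw [hlen] at hk2
    rw [Std.HashMap.getElem?_insert]
    by_cases hke : k = (cache.size : Int)
    · rw [if_pos (by simp [hke]), hke, pvAGet, if_pos (by omega),
        Array.getElem?_push, if_pos (by omega)]
    · rw [if_neg (by simp; omega), hmid k hk1 (by omega),
        pvAGet, if_pos (by omega), pvAGet, if_pos (by omega),
        Array.getElem?_push, if_neg (by omega)]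
  · rw [pvAGet, if_pos (by norm_num), Array.getElem?_push, if_neg (by omega)]
    rw [pvAGet, if_pos (by norm_num)] at hone
    exact hone

theorem step_pair {sA : Option (Std.HashMap Int Int × Int)} {sB : Option (Array Int × Int)}
    {i : Int} (h : pvRelS sA sB i) : pvRelS (stepA sA i) (stepB sB i) (i + 1) := by
  match sA, sB with
  | none, none => exact trivial
  | some (m, res), some (cache, best) =>
    obtain ⟨hres, hlen, hrel⟩ := h
    have hi2 : (2 : Int) ≤ (cache.size : Int) := by exact_mod_cast hrel.1
    rcases pvAB hrel pvFuel (cache.size : Int) 0 (by omega) (le_refl _)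
      with ⟨hg, hf⟩ | ⟨xf, d, hg, h1, h2, hf⟩
    · show pvRelS (stepA (some (m, res)) i) (stepB (some (cache, best)) i) (i + 1)
      rw [← hlen]
      simp only [stepA, stepB, hg, hf]
      exact trivial
    · show pvRelS (stepA (some (m, res)) i) (stepB (some (cache, best)) i) (i + 1)
      rw [← hlen]
      cases hc : pvAGet cache xf with
      | none =>
        simp only [stepA, stepB, hg, hf, hc, Option.map_none]
        exact trivial
      | some c =>
        simp only [stepA, stepB, hg, hf, hc, Option.map_some]
        refine ⟨by rw [hres, ifmax, show (0:Int) + d = d from by ring], by simp, ?_⟩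
        rw [show (0:Int) + d = d from by ring]
        exact pvRel_push hrel
  | none, some _ => exact absurd h (by simp [pvRelS])
  | some _, none => exact absurd h (by simp [pvRelS])

theorem fold_pair : ∀ (t : Nat) (i : Int) (sA : Option (Std.HashMap Int Int × Int))
    (sB : Option (Array Int × Int)), pvRelS sA sB i →
    pvRelS ((PySem.List.pyRange i (i + (t : Int)) 1).foldl stepA sA)
           ((PySem.List.pyRange i (i + (t : Int)) 1).foldl stepB sB) (i + (t : Int)) := by
  intro t
  induction t with
  | zero =>
    intro i sA sB h
    rw [show i + ((0 : Nat) : Int) = i from by push_cast; ring,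
      PySem.List.pyRange_one_eq_nil (le_refl i)]
    exact h
  | succ t ih =>
    intro i sA sB h
    rw [PySem.List.pyRange_one_cons (by push_cast; omega : i < i + ((t + 1 : Nat) : Int)),
      List.foldl_cons, List.foldl_cons]
    have h' := step_pair h
    have := ih (i + 1) _ _ h'
    rw [show i + 1 + ((t : Nat) : Int) = i + ((t + 1 : Nat) : Int) from by push_cast; ring]
      at this
    exact this

-- ===== VERDICT (by name: the statement is the Claim_ definition above) =====
theorem find_longest_steps_spec : Claim_equal_find_longest_steps := by
  intro num _hdom
  unfold Spec_find_longest_steps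
  unfold find_longest_steps find_longest_steps_alt
  by_cases hlt : num < 1
  · simp [hlt]
  · simp only [hlt, if_false]
    have hnum1 : (1 : Int) ≤ num := by omega
    -- peel A's first iteration (i = 1)
    rw [show PySem.List.pyRange 1 (num + 1) 1 = 1 :: PySem.List.pyRange 2 (num + 1) 1 from
      PySem.List.pyRange_one_cons (by omega), List.foldl_cons]
    have hfs1 : find_steps pvFuel ∅ 1 = some 1 := by
      rw [show pvFuel = 100500 + 1 from rfl]
      simp [find_steps]
    have hstep1 : stepA (some (∅, 0)) 1 =
        some ((∅ : Std.HashMap Int Int).insert 1 1, 1) := by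
      simp [stepA, hfs1]
    rw [hstep1]
    -- the two loops run in lockstep from related states
    have hrel0 : pvRelS (some ((∅ : Std.HashMap Int Int).insert 1 1, 1))
        (some (#[0, 1], 1)) 2 := by
      refine ⟨rfl, by decide, ⟨by decide, ?_, ?_, ?_, by decide⟩⟩
      · intro k hk
        rw [Std.HashMap.getElem?_insert, if_neg (by simp at hk ⊢; omega)]
        simp
      · intro k hk
        rw [Std.HashMap.getElem?_insert, if_neg (by simp; omega)]
        simp
      · intro k hk1 hk2
        have hk : k = 1 := by simp at hk2; omega
        rw [hk, Std.HashMap.getElem?_insert, if_pos (by simp)]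
        decide
    have hmain := fold_pair (num - 1).toNat 2 _ _ hrel0
    rw [show (2 : Int) + (((num - 1).toNat : Nat) : Int) = num + 1 from by omega] at hmain
    revert hmain
    cases hA : (PySem.List.pyRange 2 (num + 1) 1).foldl stepA
        (some ((∅ : Std.HashMap Int Int).insert 1 1, 1)) with
    | none =>
      cases hB : (PySem.List.pyRange 2 (num + 1) 1).foldl stepB (some (#[0, 1], 1)) with
      | none => intro _; rfl
      | some p => intro hmain; exact absurd hmain (by simp [pvRelS])
    | some p =>
      cases hB : (PySem.List.pyRange 2 (num + 1) 1).foldl stepB (some (#[0, 1], 1)) with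
      | none => intro hmain; exact absurd hmain (by obtain ⟨m, res⟩ := p; simp [pvRelS])
      | some q =>
        obtain ⟨m, res⟩ := p
        obtain ⟨cache, best⟩ := q
        intro hmain
        exact hmain.1
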